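-- pv_equiv track=rewrite | github.com/TheInterventionCentre/aortic-valve-event-detection | code/utils/FOV.py | get_unet_1d_param_vectors
-- ===== SOURCE A (Python) =====
-- def get_unet_1d_param_vectors(enc_chs, dilation=1, padding=0, filter_size=3):
--     N = len(enc_chs)
--     if not isinstance(filter_size, list):
--         filter_size_vec = []
--         for ii in range(N):
--             filter_size_vec.append(filter_size)
--             filter_size_vec.append(filter_size)
--             if ii<N-1:
--                 filter_size_vec.append(2)
--         filter_size = filter_size_vec
--
--     if not isinstance(dilation, list):
--         dilation_vec = []
--         for ii in range(N):
--             dilation_vec.append(dilation)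
--             dilation_vec.append(dilation)
--             if ii < N - 1:
--                 dilation_vec.append(1)
--         dilation = dilation_vec
--
--     if not isinstance(padding, list):
--         padding_vec = []
--         for ii in range(N):
--             padding_vec.append(padding)
--             padding_vec.append(padding)
--             if ii < N - 1:
--                 padding_vec.append(0)
--         padding = padding_vec
--
--     stride_vec = []
--     for ii in range(N):
--         stride_vec.append(1)
--         stride_vec.append(1)
--         if ii < N - 1:
--             stride_vec.append(2)
--     stride = stride_vec
--
--     return filter_size, stride, dilation, padding
-- ===== SOURCE B (Python) =====
-- def get_unet_1d_param_vectors(enc_chs, dilation=1, padding=0, filter_size=3):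
--     # Positional formula: the interleaved vector has 3*N-1 entries (empty for N=0),
--     # and entry i is the separator exactly when i % 3 == 2, otherwise the value.
--     N = len(enc_chs)
--
--     def vec(val, sep):
--         return [sep if i % 3 == 2 else val for i in range(3 * N - 1)]
--
--     if not isinstance(filter_size, list):
--         filter_size = vec(filter_size, 2)
--     if not isinstance(dilation, list):
--         dilation = vec(dilation, 1)
--     if not isinstance(padding, list):
--         padding = vec(padding, 0)
--     stride = vec(1, 2)
--     return filter_size, stride, dilation, padding
-- ===== Notes on version B (the rewrite author's own statement) =====
-- stated objective: idiomatic
-- what changed: Instead of a per-layer loop appending two values and a conditional separator, B derives each vector from a positional formula: one comprehension over positions 0..3N-2 that places the separator exactly at indices congruent to 2 mod 3.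
import Mathlib
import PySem

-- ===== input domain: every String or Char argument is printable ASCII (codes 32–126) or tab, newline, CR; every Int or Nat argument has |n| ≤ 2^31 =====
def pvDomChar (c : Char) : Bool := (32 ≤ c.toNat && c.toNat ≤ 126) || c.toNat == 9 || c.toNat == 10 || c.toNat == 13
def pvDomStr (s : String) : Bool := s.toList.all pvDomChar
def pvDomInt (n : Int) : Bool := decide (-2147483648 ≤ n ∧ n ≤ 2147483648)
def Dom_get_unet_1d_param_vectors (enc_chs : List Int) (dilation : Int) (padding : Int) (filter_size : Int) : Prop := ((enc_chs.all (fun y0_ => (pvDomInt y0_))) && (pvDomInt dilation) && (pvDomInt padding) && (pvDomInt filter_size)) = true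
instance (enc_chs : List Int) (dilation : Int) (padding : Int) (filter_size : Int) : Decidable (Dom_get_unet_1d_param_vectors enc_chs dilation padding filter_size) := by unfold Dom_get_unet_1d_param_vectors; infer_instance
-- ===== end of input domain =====

-- B replaces A's per-layer append loops by a positional formula: one map over the
-- positions 0..3N-2 putting the separator exactly at indices ≡ 2 (mod 3); same values, same cost.

-- ===== PORT A =====
-- A's loop 'for ii in range(N): append val; append val; if ii < N-1: append sep',
-- shared by all four vectors (the ints dilation/padding/filter_size are never lists here,
-- so the 'not isinstance(.., list)' guards are always taken).
def pvLoopVec (N : Nat) (val sep : Int) : List Int :=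
  (List.range N).foldl
    (fun acc ii => if ii < N - 1 then acc ++ [val, val] ++ [sep] else acc ++ [val, val]) []

def get_unet_1d_param_vectors (enc_chs : List Int) (dilation : Int) (padding : Int) (filter_size : Int) : List Int × List Int × List Int × List Int :=
  let N := enc_chs.length
  let filter_size_vec := pvLoopVec N filter_size 2
  let dilation_vec := pvLoopVec N dilation 1
  let padding_vec := pvLoopVec N padding 0
  let stride_vec := pvLoopVec N 1 2
  (filter_size_vec, stride_vec, dilation_vec, padding_vec)

-- ===== PORT B =====
-- Source B's 'vec': [sep if i % 3 == 2 else val for i in range(3*N - 1)].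
-- Python's range(3*N-1) is empty for N = 0, exactly as Nat subtraction's 3*0-1 = 0.
def pvFormVec (N : Nat) (val sep : Int) : List Int :=
  (List.range (3 * N - 1)).map (fun i => if i % 3 == 2 then sep else val)

def get_unet_1d_param_vectors_alt (enc_chs : List Int) (dilation : Int) (padding : Int) (filter_size : Int) : List Int × List Int × List Int × List Int :=
  let N := enc_chs.length
  (pvFormVec N filter_size 2, pvFormVec N 1 2, pvFormVec N dilation 1, pvFormVec N padding 0)

-- ===== PRECONDITION & SPEC =====
def Spec_get_unet_1d_param_vectors (enc_chs : List Int) (dilation : Int) (padding : Int) (filter_size : Int) (out : List Int × List Int × List Int × List Int) : Prop := out = get_unet_1d_param_vectors_alt enc_chs dilation padding filter_size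
instance (enc_chs : List Int) (dilation : Int) (padding : Int) (filter_size : Int) (out : List Int × List Int × List Int × List Int) : Decidable (Spec_get_unet_1d_param_vectors enc_chs dilation padding filter_size out) := by unfold Spec_get_unet_1d_param_vectors; infer_instance

-- ===== CLAIM (what is proved, stated in full; the proofs are below) =====
def Claim_equal_get_unet_1d_param_vectors : Prop := ∀ (enc_chs : List Int) (dilation : Int) (padding : Int) (filter_size : Int), Dom_get_unet_1d_param_vectors enc_chs dilation padding filter_size → Spec_get_unet_1d_param_vectors enc_chs dilation padding filter_size (get_unet_1d_param_vectors enc_chs dilation padding filter_size)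

-- ===== LEMMAS AND PROOFS =====

-- Common normal form both sides are reduced to.
def pvRepVec (N : Nat) (val sep : Int) : List Int :=
  (List.replicate (N - 1) [val, val, sep]).flatten ++ (if N ≠ 0 then [val, val] else [])

-- The first K iterations (K ≤ bound) of A's loop all take the 'append separator' branch.
lemma pvLoop_prefix (val sep : Int) (K : Nat) : ∀ (M : Nat), K ≤ M → ∀ (acc : List Int),
    (List.range K).foldl
      (fun acc ii => if ii < M then acc ++ [val, val] ++ [sep] else acc ++ [val, val]) acc
      = acc ++ (List.replicate K [val, val, sep]).flatten := by
  induction K with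
  | zero => intro M _ acc; simp
  | succ k ih =>
    intro M h acc
    rw [List.range_succ, List.foldl_append, ih M (by omega)]
    have hk : k < M := by omega
    simp [hk, List.replicate_succ' (n := k)]

lemma pvLoopVec_eq_pvRepVec (N : Nat) (val sep : Int) :
    pvLoopVec N val sep = pvRepVec N val sep := by
  cases N with
  | zero => rfl
  | succ M =>
    unfold pvLoopVec pvRepVec
    rw [List.range_succ, List.foldl_append]
    have : (M + 1 : Nat) - 1 = M := rfl
    rw [this, pvLoop_prefix val sep M M le_rfl]
    simp

lemma pvFormVec_eq_pvRepVec (val sep : Int) : ∀ (N : Nat),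
    pvFormVec N val sep = pvRepVec N val sep := by
  intro N
  induction N with
  | zero => rfl
  | succ k ih =>
    cases k with
    | zero => simp [pvFormVec, pvRepVec, List.range_succ]
    | succ m =>
      have h3 : 3 * (m + 2) - 1 = (3 * (m + 1) - 1) + 1 + 1 + 1 := by omega
      unfold pvFormVec at ih ⊢
      rw [h3, List.range_succ, List.range_succ, List.range_succ]
      simp only [List.map_append, ih]
      have e1 : (3 * (m + 1) - 1) % 3 = 2 := by omega
      have e2 : (3 * (m + 1) - 1 + 1) % 3 = 0 := by omega
      have e3 : (3 * (m + 1) - 1 + 1 + 1) % 3 = 1 := by omega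
      simp only [List.map_cons, List.map_nil, e1, e2, e3]
      unfold pvRepVec
      simp [List.replicate_succ' (n := m)]

-- ===== VERDICT (by name: the statement is the Claim_ definition above) =====
theorem get_unet_1d_param_vectors_spec : Claim_equal_get_unet_1d_param_vectors := by
  intro enc_chs dilation padding filter_size _
  unfold Spec_get_unet_1d_param_vectors get_unet_1d_param_vectors get_unet_1d_param_vectors_alt
  simp only [pvLoopVec_eq_pvRepVec, pvFormVec_eq_pvRepVec]
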